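-- pv_equiv track=rewrite | github.com/ArsenHandzhyan/wifi-densepose | ui/dev_server.py | summarize_failed_criteria
-- ===== SOURCE A (Python) =====
-- CRITERIA_SUMMARY_MAP = {
--     "same_run_paired_bundle_present": {
--       "text": "нет same-run paired bundle",
--       "priority": 70,
--     },
--     "topology_matches_required_four_node": {
--       "text": "топология не совпала с обязательной four-node схемой",
--       "priority": 80,
--     },
--     "frozen_threshold_is_0996": {
--       "text": "runtime-threshold ушёл от frozen 0.996",
--       "priority": 90,
--     },
--     "clean_entry_first_possible": {
--       "text": "clean entry-first progression не стала возможной",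
--       "priority": 10,
--     },
--     "first_direction_assignment_is_entry": {
--       "text": "первое назначение направления не было entry",
--       "priority": 20,
--     },
--     "entry_active_seen_before_entry_resolved": {
--       "text": "entry_active не появился до entry_resolved",
--       "priority": 30,
--     },
--     "entry_resolved_before_any_context_invalid": {
--       "text": "entry не успел resolved до context-invalid",
--       "priority": 40,
--     },
--     "no_unexpected_exit_before_entry_before_resolve": {
--       "text": "неожиданный exit появился до resolved-entry",
--       "priority": 50,
--     },
--     "paired_raw_covers_entry_resolved": {
--       "text": "paired raw coverage не покрывает resolved-entry event",
--       "priority": 60,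
--     },
-- }
--
-- def humanize_token(value: str | None) -> str:
--     if not value:
--       return "unknown"
--     return str(value).replace("_", " ")
--
-- def summarize_failed_criteria(failed_criteria: list[str], failure_family: str | None) -> tuple[str | None, int]:
--     if not failed_criteria:
--       return None, 0
--
--     skipped = set()
--     if failure_family == "strong_pulse_without_direction_assignment":
--       skipped.add("first_direction_assignment_is_entry")
--     if failure_family in {"exit_first_prebaseline_aliasing", "unexpected_exit_before_entry", "exit_assigned_before_entry"}:
--       skipped.update({"first_direction_assignment_is_entry", "clean_entry_first_possible"})
--
--     descriptors = [
--       {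
--         "text": CRITERIA_SUMMARY_MAP.get(item, {}).get("text", humanize_token(item)),
--         "priority": CRITERIA_SUMMARY_MAP.get(item, {}).get("priority", 999),
--       }
--       for item in failed_criteria
--       if item not in skipped
--     ]
--     if not descriptors:
--       descriptors = [
--         {
--           "text": CRITERIA_SUMMARY_MAP.get(item, {}).get("text", humanize_token(item)),
--           "priority": CRITERIA_SUMMARY_MAP.get(item, {}).get("priority", 999),
--         }
--         for item in failed_criteria
--       ]
--
--     if not descriptors:
--       return None, 0
--
--     descriptors.sort(key=lambda item: item["priority"])
--     return descriptors[0]["text"], max(0, len(descriptors) - 1)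
-- ===== SOURCE B (Python) =====
-- _CRIT = {
--     "same_run_paired_bundle_present": ("нет same-run paired bundle", 70),
--     "topology_matches_required_four_node": ("топология не совпала с обязательной four-node схемой", 80),
--     "frozen_threshold_is_0996": ("runtime-threshold ушёл от frozen 0.996", 90),
--     "clean_entry_first_possible": ("clean entry-first progression не стала возможной", 10),
--     "first_direction_assignment_is_entry": ("первое назначение направления не было entry", 20),
--     "entry_active_seen_before_entry_resolved": ("entry_active не появился до entry_resolved", 30),
--     "entry_resolved_before_any_context_invalid": ("entry не успел resolved до context-invalid", 40),
--     "no_unexpected_exit_before_entry_before_resolve": ("неожиданный exit появился до resolved-entry", 50),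
--     "paired_raw_covers_entry_resolved": ("paired raw coverage не покрывает resolved-entry event", 60),
-- }
--
--
-- def _descriptor(item):
--     entry = _CRIT.get(item)
--     if entry is not None:
--         return entry
--     return (item.replace("_", " ") if item else "unknown", 999)
--
--
-- def summarize_failed_criteria(failed_criteria, failure_family):
--     if not failed_criteria:
--         return None, 0
--
--     if failure_family == "strong_pulse_without_direction_assignment":
--         skipped = ("first_direction_assignment_is_entry",)
--     elif failure_family in ("exit_first_prebaseline_aliasing",
--                             "unexpected_exit_before_entry",
--                             "exit_assigned_before_entry"):
--         skipped = ("first_direction_assignment_is_entry", "clean_entry_first_possible")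
--     else:
--         skipped = ()
--
--     items = [x for x in failed_criteria if x not in skipped] or failed_criteria
--
--     best_text, best_priority = _descriptor(items[0])
--     count = 1
--     for x in items[1:]:
--         text, priority = _descriptor(x)
--         if priority < best_priority:
--             best_text, best_priority = text, priority
--         count += 1
--     return best_text, count - 1
-- ===== Notes on version B (the rewrite author's own statement) =====
-- stated objective: faster
-- what changed: B replaces A's build-descriptors-then-stable-sort-then-take-first with a single strict-< min scan over the filtered items that tracks the best (text, priority) and the count in one pass, keeping the skipped-set filtering and fallback-to-full-list logic.
import Mathlib
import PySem

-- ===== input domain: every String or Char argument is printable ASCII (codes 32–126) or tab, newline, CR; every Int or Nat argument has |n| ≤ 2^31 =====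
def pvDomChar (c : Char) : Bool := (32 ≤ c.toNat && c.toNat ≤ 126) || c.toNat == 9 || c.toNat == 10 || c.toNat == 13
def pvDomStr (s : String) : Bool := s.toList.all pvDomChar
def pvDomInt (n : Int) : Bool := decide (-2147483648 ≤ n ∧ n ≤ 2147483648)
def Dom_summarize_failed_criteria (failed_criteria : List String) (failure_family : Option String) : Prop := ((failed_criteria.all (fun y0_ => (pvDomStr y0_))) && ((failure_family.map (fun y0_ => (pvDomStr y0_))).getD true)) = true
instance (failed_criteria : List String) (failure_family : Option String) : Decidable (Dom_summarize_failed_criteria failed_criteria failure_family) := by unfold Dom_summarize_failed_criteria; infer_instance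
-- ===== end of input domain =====

-- B replaces A's sort-then-take-first on the descriptor list by a single strict-< min scan
-- that also counts as it goes (objective: simpler/alternative; same return value everywhere).


-- ===== PORT A =====
-- CRITERIA_SUMMARY_MAP: each inner dict {"text": …, "priority": …} is modelled as the pair
-- (text, priority) — its two fields are static, so field access is .1 / .2 (exact).
def pvCritMap : PySem.Dict String (String × Int) :=
  PySem.Dict.ofList
  [("same_run_paired_bundle_present", ("нет same-run paired bundle", 70)),
   ("topology_matches_required_four_node", ("топология не совпала с обязательной four-node схемой", 80)),
   ("frozen_threshold_is_0996", ("runtime-threshold ушёл от frozen 0.996", 90)),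
   ("clean_entry_first_possible", ("clean entry-first progression не стала возможной", 10)),
   ("first_direction_assignment_is_entry", ("первое назначение направления не было entry", 20)),
   ("entry_active_seen_before_entry_resolved", ("entry_active не появился до entry_resolved", 30)),
   ("entry_resolved_before_any_context_invalid", ("entry не успел resolved до context-invalid", 40)),
   ("no_unexpected_exit_before_entry_before_resolve", ("неожиданный exit появился до resolved-entry", 50)),
   ("paired_raw_covers_entry_resolved", ("paired raw coverage не покрывает resolved-entry event", 60))]

def humanize_token (value : String) : String :=
  if value = "" then "unknown" else PySem.Str.replace value "_" " "

-- CRITERIA_SUMMARY_MAP.get(item, {}).get("text", humanize_token(item)) / .get("priority", 999)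
def pvTextA (item : String) : String :=
  match PySem.Dict.get? pvCritMap item with
  | some e => e.1
  | none => humanize_token item

def pvPrioA (item : String) : Int :=
  match PySem.Dict.get? pvCritMap item with
  | some e => e.2
  | none => 999

def summarize_failed_criteria (failed_criteria : List String) (failure_family : Option String) : Option String × Int :=
  if failed_criteria = [] then (none, 0)
  else
    let skipped : PySem.Set String := PySem.Set.empty
    let skipped := if failure_family = some "strong_pulse_without_direction_assignment" then
        PySem.Set.add skipped "first_direction_assignment_is_entry" else skipped
    let skipped := if failure_family = some "exit_first_prebaseline_aliasing" ∨
                      failure_family = some "unexpected_exit_before_entry" ∨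
                      failure_family = some "exit_assigned_before_entry" then
        PySem.Set.update skipped ["first_direction_assignment_is_entry", "clean_entry_first_possible"]
      else skipped
    let descriptors : List (String × Int) :=
      (failed_criteria.filter (fun item => !(PySem.Set.contains skipped item))).map
        (fun item => (pvTextA item, pvPrioA item))
    let descriptors := if descriptors = [] then
        failed_criteria.map (fun item => (pvTextA item, pvPrioA item))
      else descriptors
    if descriptors = [] then (none, 0)
    else
      match PySem.List.sorted descriptors (fun d => d.2) false with
      | d :: _ => (some d.1, max 0 ((descriptors.length : Int) - 1))
      | [] => (none, 0)   -- unreachable: descriptors ≠ []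

-- ===== PORT B =====
def pvDescB (item : String) : String × Int :=
  match PySem.Dict.get? pvCritMap item with
  | some e => e
  | none => (if item = "" then "unknown" else PySem.Str.replace item "_" " ", 999)

def summarize_failed_criteria_alt (failed_criteria : List String) (failure_family : Option String) : Option String × Int :=
  match failed_criteria with
  | [] => (none, 0)
  | _ :: _ =>
    let skipped : List String :=
      if failure_family = some "strong_pulse_without_direction_assignment" then
        ["first_direction_assignment_is_entry"]
      else if failure_family = some "exit_first_prebaseline_aliasing" ∨
              failure_family = some "unexpected_exit_before_entry" ∨
              failure_family = some "exit_assigned_before_entry" then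
        ["first_direction_assignment_is_entry", "clean_entry_first_possible"]
      else []
    let filtered := failed_criteria.filter (fun x => !(skipped.contains x))
    let items := if filtered = [] then failed_criteria else filtered
    match items with
    | [] => (none, 0)   -- unreachable: items is never empty
    | i :: rest =>
      let st := rest.foldl
        (fun (acc : (String × Int) × Int) x =>
          (if (pvDescB x).2 < acc.1.2 then pvDescB x else acc.1, acc.2 + 1))
        (pvDescB i, 1)
      (some st.1.1, st.2 - 1)

-- ===== PRECONDITION & SPEC =====
def Spec_summarize_failed_criteria (failed_criteria : List String) (failure_family : Option String) (out : Option String × Int) : Prop := out = summarize_failed_criteria_alt failed_criteria failure_family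
instance (failed_criteria : List String) (failure_family : Option String) (out : Option String × Int) : Decidable (Spec_summarize_failed_criteria failed_criteria failure_family out) := by unfold Spec_summarize_failed_criteria; infer_instance

-- ===== CLAIM (what is proved, stated in full; the proofs are below) =====
def Claim_equal_summarize_failed_criteria : Prop := ∀ (failed_criteria : List String) (failure_family : Option String), Dom_summarize_failed_criteria failed_criteria failure_family → Spec_summarize_failed_criteria failed_criteria failure_family (summarize_failed_criteria failed_criteria failure_family)

-- ===== LEMMAS AND PROOFS =====

-- proof-side restatement of B's skipped list and of the two halves of each port's body
def pvSkipList (ff : Option String) : List String :=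
  if ff = some "strong_pulse_without_direction_assignment" then
    ["first_direction_assignment_is_entry"]
  else if ff = some "exit_first_prebaseline_aliasing" ∨
          ff = some "unexpected_exit_before_entry" ∨
          ff = some "exit_assigned_before_entry" then
    ["first_direction_assignment_is_entry", "clean_entry_first_possible"]
  else []

-- A's descriptor pipeline with the skipped set abstracted out
def pvTail (fc : List String) (skipped : PySem.Set String) : Option String × Int :=
  let descriptors : List (String × Int) :=
    (fc.filter (fun item => !(PySem.Set.contains skipped item))).map
      (fun item => (pvTextA item, pvPrioA item))
  let descriptors := if descriptors = [] then
      fc.map (fun item => (pvTextA item, pvPrioA item))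
    else descriptors
  if descriptors = [] then (none, 0)
  else
    match PySem.List.sorted descriptors (fun d => d.2) false with
    | d :: _ => (some d.1, max 0 ((descriptors.length : Int) - 1))
    | [] => (none, 0)

-- the shared filter/fallback/min-scan pipeline both ports reduce to
def pvRun (fc : List String) (skipped : List String) : Option String × Int :=
  let fl := fc.filter (fun x => !(skipped.contains x))
  let items := if fl = [] then fc else fl
  match items with
  | [] => (none, 0)
  | i :: rest =>
    (some ((rest.map pvDescB).foldl (fun best d => if d.2 < best.2 then d else best) (pvDescB i)).1,
     (rest.length : Int))

theorem pvDescB_eq (item : String) : (pvTextA item, pvPrioA item) = pvDescB item := by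
  unfold pvDescB pvTextA pvPrioA humanize_token
  cases PySem.Dict.get? pvCritMap item <;> simp

-- head of the stable insertion sort = strict-< min scan
theorem head_insertBy (x h : String × Int) (t : List (String × Int)) :
    (PySem.List.insertBy (fun a b => decide (a.2 < b.2)) x (h :: t)).head? =
      some (if x.2 < h.2 then x else h) := by
  simp only [PySem.List.insertBy]
  by_cases hx : x.2 < h.2 <;> simp [hx]

theorem head_foldl_insertBy (ds : List (String × Int)) (b : String × Int) (t acc : List (String × Int))
    (hacc : acc = b :: t) :
    (ds.foldl (fun acc x => PySem.List.insertBy (fun a b => decide (a.2 < b.2)) x acc) acc).head? =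
      some (ds.foldl (fun best d => if d.2 < best.2 then d else best) b) := by
  induction ds generalizing b t acc with
  | nil => simp [hacc]
  | cons d ds ih =>
    subst hacc
    simp only [List.foldl_cons]
    have hh := head_insertBy d b t
    rcases hlist : PySem.List.insertBy (fun a b => decide (a.2 < b.2)) d (b :: t) with _ | ⟨b', t'⟩
    · rw [hlist] at hh; simp at hh
    · rw [hlist] at hh
      simp only [List.head?_cons, Option.some.injEq] at hh
      rw [ih b' t' _ hlist, hh]

theorem head_sorted_eq_scan (d0 : String × Int) (ds : List (String × Int)) :
    (PySem.List.sorted (d0 :: ds) (fun d => d.2) false).head? =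
      some (ds.foldl (fun best d => if d.2 < best.2 then d else best) d0) := by
  rw [PySem.List.sorted_eq_foldl_insertBy]
  simp only [List.foldl_cons]
  exact head_foldl_insertBy ds d0 [] _ (by simp [PySem.List.insertBy])

-- A's Set-built skipped (zeta-reduced) equals B's skipped list
theorem skipA_eq (ff : Option String) :
    (if ff = some "exit_first_prebaseline_aliasing" ∨
        ff = some "unexpected_exit_before_entry" ∨
        ff = some "exit_assigned_before_entry" then
       PySem.Set.update
         (if ff = some "strong_pulse_without_direction_assignment" then
            PySem.Set.add PySem.Set.empty "first_direction_assignment_is_entry"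
          else PySem.Set.empty)
         ["first_direction_assignment_is_entry", "clean_entry_first_possible"]
     else
       (if ff = some "strong_pulse_without_direction_assignment" then
          PySem.Set.add PySem.Set.empty "first_direction_assignment_is_entry"
        else PySem.Set.empty)) = pvSkipList ff := by
  by_cases h1 : ff = some "strong_pulse_without_direction_assignment"
  · subst h1; decide
  · by_cases h2 : ff = some "exit_first_prebaseline_aliasing" ∨
                  ff = some "unexpected_exit_before_entry" ∨
                  ff = some "exit_assigned_before_entry"
    · rcases h2 with h | h | h <;> subst h <;> decide
    · unfold pvSkipList
      rw [if_neg h2, if_neg h1, if_neg h1, if_neg h2]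
      rfl

-- the pipelines agree once the skipped list is shared
theorem tail_run (fc : List String) (sk : List String) (h : fc ≠ []) :
    pvTail fc sk = pvRun fc sk := by
  unfold pvTail pvRun
  have hfun : (fun item => (pvTextA item, pvPrioA item)) = pvDescB := funext pvDescB_eq
  simp only [hfun, PySem.Set.contains_eq_listContains]
  set fl := fc.filter (fun x => !(sk.contains x)) with hfl
  have hmap : (if fl.map pvDescB = [] then fc.map pvDescB else fl.map pvDescB) =
      (if fl = [] then fc else fl).map pvDescB := by
    cases fl <;> simp
  rw [hmap]
  have hne : (if fl = [] then fc else fl) ≠ [] := by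
    split
    · exact h
    · assumption
  rcases hitem : (if fl = [] then fc else fl) with _ | ⟨i, rest⟩
  · exact absurd hitem hne
  · simp only [List.map_cons]
    rw [if_neg (by simp)]
    have hh := head_sorted_eq_scan (pvDescB i) (rest.map pvDescB)
    rcases hs : PySem.List.sorted (pvDescB i :: rest.map pvDescB) (fun d => d.2) false with _ | ⟨m, t⟩
    · rw [hs] at hh; simp at hh
    · rw [hs] at hh
      simp only [List.head?_cons, Option.some.injEq] at hh
      subst hh
      simp only [List.length_cons, List.length_map]
      congr 1
      omega

-- A equals the common pipeline
theorem A_run (fc : List String) (ff : Option String) (h : fc ≠ []) :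
    summarize_failed_criteria fc ff = pvRun fc (pvSkipList ff) := by
  have e1 : summarize_failed_criteria fc ff = pvTail fc
      (if ff = some "exit_first_prebaseline_aliasing" ∨
          ff = some "unexpected_exit_before_entry" ∨
          ff = some "exit_assigned_before_entry" then
         PySem.Set.update
           (if ff = some "strong_pulse_without_direction_assignment" then
              PySem.Set.add PySem.Set.empty "first_direction_assignment_is_entry"
            else PySem.Set.empty)
           ["first_direction_assignment_is_entry", "clean_entry_first_possible"]
       else
         (if ff = some "strong_pulse_without_direction_assignment" then
            PySem.Set.add PySem.Set.empty "first_direction_assignment_is_entry"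
          else PySem.Set.empty)) := by
    unfold summarize_failed_criteria pvTail
    rw [if_neg h]
  rw [e1, skipA_eq, tail_run fc _ h]

-- B's scan: the count component
theorem scan_count (rest : List String) (b : (String × Int) × Int) :
    (rest.foldl
        (fun (acc : (String × Int) × Int) x =>
          (if (pvDescB x).2 < acc.1.2 then pvDescB x else acc.1, acc.2 + 1)) b).2 =
      b.2 + rest.length := by
  induction rest generalizing b with
  | nil => simp
  | cons x xs ih => simp only [List.foldl_cons, ih, List.length_cons]; push_cast; ring

-- B's scan: the best component is the min scan over the mapped descriptors
theorem scan_best (rest : List String) (b : (String × Int) × Int) :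
    (rest.foldl
        (fun (acc : (String × Int) × Int) x =>
          (if (pvDescB x).2 < acc.1.2 then pvDescB x else acc.1, acc.2 + 1)) b).1 =
      (rest.map pvDescB).foldl (fun best d => if d.2 < best.2 then d else best) b.1 := by
  induction rest generalizing b with
  | nil => rfl
  | cons x xs ih => simp only [List.foldl_cons, List.map_cons, ih]

-- B equals the common pipeline
theorem B_run (fc : List String) (ff : Option String) (h : fc ≠ []) :
    summarize_failed_criteria_alt fc ff = pvRun fc (pvSkipList ff) := by
  rcases fc with _ | ⟨f, fs⟩
  · exact absurd rfl h
  · have e1 : summarize_failed_criteria_alt (f :: fs) ff =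
        (match (if (f :: fs).filter (fun x => !((pvSkipList ff).contains x)) = []
                then (f :: fs)
                else (f :: fs).filter (fun x => !((pvSkipList ff).contains x))) with
         | [] => ((none : Option String), (0 : Int))
         | i :: rest =>
           let st := rest.foldl
             (fun (acc : (String × Int) × Int) x =>
               (if (pvDescB x).2 < acc.1.2 then pvDescB x else acc.1, acc.2 + 1))
             (pvDescB i, 1)
           (some st.1.1, st.2 - 1)) := by
      unfold summarize_failed_criteria_alt pvSkipList
      rfl
    rw [e1]
    unfold pvRun
    set fl := (f :: fs).filter (fun x => !((pvSkipList ff).contains x)) with hfl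
    have hne : (if fl = [] then (f :: fs) else fl) ≠ [] := by
      split
      · simp
      · assumption
    rcases hitem : (if fl = [] then (f :: fs) else fl) with _ | ⟨i, rest⟩
    · exact absurd hitem hne
    · simp only [hitem, scan_best, scan_count]
      simp

-- ===== VERDICT (by name: the statement is the Claim_ definition above) =====
theorem summarize_failed_criteria_spec : Claim_equal_summarize_failed_criteria := by
  intro fc ff _
  unfold Spec_summarize_failed_criteria
  rcases fc with _ | ⟨f, fs⟩
  · rfl
  · rw [A_run _ ff (by simp), B_run _ ff (by simp)]
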